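-- pv_equiv track=rewrite | github.com/KilianZimmerer/flantland-sim | flatland_sim/runner.py | _trim_to_common_presence
-- ===== SOURCE A (Python) =====
-- def _trim_to_common_presence(timesteps: list[dict]) -> list[dict]:
--     """Return the sub-sequence of *timesteps* where every agent is on the
--     grid and none has reached DONE status yet.
--
--     The first valid step is the one where the last agent departs (position
--     becomes non-None).  The last valid step is the one just before the
--     first agent reaches DONE.  If no such window exists the full list is
--     returned unchanged so downstream code still has data to work with.
--     """
--     if not timesteps:
--         return timesteps
--
--     num_agents = len(timesteps[0]["agents"])
--
--     # Find the first step where ALL agents have a non-None position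
--     start = None
--     for idx, ts in enumerate(timesteps):
--         if all(a["position"] is not None for a in ts["agents"]):
--             start = idx
--             break
--
--     # Find the first step where ANY agent has status DONE
--     end = len(timesteps)
--     for idx, ts in enumerate(timesteps):
--         if any(a["status"] == "DONE" for a in ts["agents"]):
--             end = idx
--             break
--
--     if start is not None and start < end:
--         return timesteps[start:end]
--
--     # No valid common-presence window — return as-is
--     return timesteps
-- ===== SOURCE B (Python) =====
-- def _trim_to_common_presence(timesteps: list[dict]) -> list[dict]:
--     """Consume a single shared iterator: advance it past the not-yet-all-present
--     prefix (aborting if a DONE step appears first), then build the window by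
--     a take-while over the rest of the same iterator. No indices, no slicing."""
--     if not timesteps:
--         return timesteps
--
--     def _done(ts):
--         return any(a["status"] == "DONE" for a in ts["agents"])
--
--     def _present(ts):
--         return all(a["position"] is not None for a in ts["agents"])
--
--     it = iter(timesteps)
--     first = None
--     for ts in it:
--         if _done(ts):
--             break
--         if _present(ts):
--             first = ts
--             break
--     if first is None:
--         return timesteps
--
--     window = [first]
--     for ts in it:
--         if _done(ts):
--             break
--         window.append(ts)
--     return window
-- ===== Notes on version B (the rewrite author's own statement) =====
-- stated objective: alternative
-- what changed: Instead of two independent index scans plus a slice, B consumes one shared iterator: it drops the not-all-present prefix (aborting to the full list if a DONE step comes first), then builds the window by a take-while over the remainder of the same iterator; no indices or slicing.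
import Mathlib
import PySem

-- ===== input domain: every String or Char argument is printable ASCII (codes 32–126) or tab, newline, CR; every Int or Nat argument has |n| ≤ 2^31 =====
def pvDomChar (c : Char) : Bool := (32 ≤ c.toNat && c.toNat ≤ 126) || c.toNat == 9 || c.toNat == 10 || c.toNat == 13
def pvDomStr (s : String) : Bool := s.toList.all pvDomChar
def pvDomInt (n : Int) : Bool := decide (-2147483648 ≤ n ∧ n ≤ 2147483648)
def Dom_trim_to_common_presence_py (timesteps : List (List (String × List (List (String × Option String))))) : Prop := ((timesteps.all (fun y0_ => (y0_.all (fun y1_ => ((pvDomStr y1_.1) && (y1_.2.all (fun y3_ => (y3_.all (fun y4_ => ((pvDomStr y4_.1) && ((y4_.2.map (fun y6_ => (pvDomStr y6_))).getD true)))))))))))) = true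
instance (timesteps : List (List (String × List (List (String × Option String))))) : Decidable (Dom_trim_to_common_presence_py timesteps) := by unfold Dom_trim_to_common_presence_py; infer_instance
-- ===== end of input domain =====

-- B replaces A's two index scans + slice by one shared-iterator drop/take pass that builds the window (objective: alternative, same cost).

-- ===== PORT A =====
-- ts["agents"]: exact under Pre_ (the key is present, so getD returns the stored value)
def pvAgents (ts : List (String × List (List (String × Option String)))) :
    List (List (String × Option String)) :=
  PySem.Dict.getD (PySem.Dict.mk ts) "agents" []

-- all(a["position"] is not None for a in agents): exact under Pre_ (key present)
def pvAllPresent (ags : List (List (String × Option String))) : Bool :=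
  ags.all (fun a => (PySem.Dict.getD (PySem.Dict.mk a) "position" none).isSome)

-- any(a["status"] == "DONE" for a in agents): exact under Pre_ (key present)
def pvAnyDone (ags : List (List (String × Option String))) : Bool :=
  ags.any (fun a => PySem.Dict.getD (PySem.Dict.mk a) "status" none == some "DONE")

-- A's first loop: first index where all agents have a position (break)
def pvFindStartA (idx : Nat) (l : List (List (String × List (List (String × Option String))))) : Option Nat :=
  match l with
  | [] => none
  | ts :: rest => if pvAllPresent (pvAgents ts) then some idx else pvFindStartA (idx + 1) rest

-- A's second loop: first index where any agent is DONE, else the default len(timesteps)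
def pvFindEndA (idx : Nat) (dflt : Nat) (l : List (List (String × List (List (String × Option String))))) : Nat :=
  match l with
  | [] => dflt
  | ts :: rest => if pvAnyDone (pvAgents ts) then idx else pvFindEndA (idx + 1) dflt rest

def trim_to_common_presence_py (timesteps : List (List (String × List (List (String × Option String))))) : List (List (String × List (List (String × Option String)))) :=
  if timesteps.isEmpty then timesteps
  else
    let _num_agents := (pvAgents (timesteps.headD [])).length
    let start := pvFindStartA 0 timesteps
    let endIdx := pvFindEndA 0 timesteps.length timesteps
    match start with
    | some s => if s < endIdx then PySem.List.slice timesteps (some (s : Int)) (some (endIdx : Int)) else timesteps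
    | none => timesteps

-- ===== PORT B =====
-- B's first loop over the shared iterator: returns the first all-present step together
-- with the not-yet-consumed remainder of the iterator; none if a DONE step comes first
def pvFindFirstB (l : List (List (String × List (List (String × Option String))))) :
    Option ((List (String × List (List (String × Option String)))) × List (List (String × List (List (String × Option String))))) :=
  match l with
  | [] => none
  | ts :: rest =>
    if pvAnyDone (pvAgents ts) then none
    else if pvAllPresent (pvAgents ts) then some (ts, rest)
    else pvFindFirstB rest

-- B's second loop: take-while over the rest of the iterator, appending until a DONE step
def pvTakeWB (l : List (List (String × List (List (String × Option String))))) :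
    List (List (String × List (List (String × Option String)))) :=
  match l with
  | [] => []
  | ts :: rest => if pvAnyDone (pvAgents ts) then [] else ts :: pvTakeWB rest

def trim_to_common_presence_py_alt (timesteps : List (List (String × List (List (String × Option String))))) : List (List (String × List (List (String × Option String)))) :=
  if timesteps.isEmpty then timesteps
  else
    match pvFindFirstB timesteps with
    | none => timesteps
    | some (first, it) => first :: pvTakeWB it

-- ===== PRECONDITION & SPEC =====
-- Pre_ excludes inputs where some timestep lacks the "agents" key or some agent lacks "position"/"status"
-- (Python raises KeyError there); it is slightly narrower than A's exact domain: A can still return when the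
-- missing key sits in a step its loops never reach after an early break.
def Pre_trim_to_common_presence_py (timesteps : List (List (String × List (List (String × Option String))))) : Prop :=
  ∀ ts ∈ timesteps, PySem.Dict.contains (PySem.Dict.mk ts) "agents" = true ∧
    ∀ a ∈ PySem.Dict.getD (PySem.Dict.mk ts) "agents" [],
      PySem.Dict.contains (PySem.Dict.mk a) "position" = true ∧ PySem.Dict.contains (PySem.Dict.mk a) "status" = true
instance (timesteps : List (List (String × List (List (String × Option String))))) : Decidable (Pre_trim_to_common_presence_py timesteps) := by unfold Pre_trim_to_common_presence_py; infer_instance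

def pvWitness_trim_to_common_presence_py : (List (List (String × List (List (String × Option String))))) :=
  [[("agents", [[("position", some "p"), ("status", some "ACTIVE")]])],
   [("agents", [[("position", some "q"), ("status", some "DONE")]])]]

def Spec_trim_to_common_presence_py (timesteps : List (List (String × List (List (String × Option String))))) (out : List (List (String × List (List (String × Option String))))) : Prop := out = trim_to_common_presence_py_alt timesteps
instance (timesteps : List (List (String × List (List (String × Option String))))) (out : List (List (String × List (List (String × Option String))))) : Decidable (Spec_trim_to_common_presence_py timesteps out) := by unfold Spec_trim_to_common_presence_py; infer_instance

-- ===== CLAIM (what is proved, stated in full; the proofs are below) =====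
def Claim_equal_trim_to_common_presence_py : Prop := ∀ (timesteps : List (List (String × List (List (String × Option String))))), Dom_trim_to_common_presence_py timesteps → Pre_trim_to_common_presence_py timesteps → Spec_trim_to_common_presence_py timesteps (trim_to_common_presence_py timesteps)

-- ===== LEMMAS AND PROOFS =====

theorem pvFindStartA_shift : ∀ (l : List (List (String × List (List (String × Option String))))) (i : Nat),
    pvFindStartA (i + 1) l = (pvFindStartA i l).map (· + 1)
  | [], _ => rfl
  | ts :: rest, i => by
      rw [pvFindStartA, pvFindStartA]
      split
      · rfl
      · exact pvFindStartA_shift rest (i + 1)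

theorem pvFindEndA_shift : ∀ (l : List (List (String × List (List (String × Option String))))) (i d : Nat),
    pvFindEndA (i + 1) (d + 1) l = pvFindEndA i d l + 1
  | [], _, _ => rfl
  | ts :: rest, i, d => by
      rw [pvFindEndA, pvFindEndA]
      split
      · rfl
      · exact pvFindEndA_shift rest (i + 1) d

theorem pvTakeWB_eq : ∀ (l : List (List (String × List (List (String × Option String))))),
    pvTakeWB l = l.take (pvFindEndA 0 l.length l)
  | [] => rfl
  | ts :: rest => by
      rw [pvTakeWB, pvFindEndA]
      split
      · rfl
      · rw [List.length_cons, show rest.length + 1 = rest.length + 1 from rfl,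
          pvFindEndA_shift rest 0 rest.length, List.take_succ_cons, pvTakeWB_eq rest]

-- the first DONE default never exceeds the list length
theorem pvFindEndA_le : ∀ (l : List (List (String × List (List (String × Option String))))),
    pvFindEndA 0 l.length l ≤ l.length
  | [] => le_rfl
  | ts :: rest => by
      rw [pvFindEndA, List.length_cons, pvFindEndA_shift rest 0 rest.length]
      split
      · omega
      · have := pvFindEndA_le rest; omega

-- the first DONE index grows by exactly s when s steps before it are dropped
theorem pvFindEndA_drop : ∀ (s : Nat) (l : List (List (String × List (List (String × Option String))))),
    s ≤ pvFindEndA 0 l.length l →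
    pvFindEndA 0 l.length l = s + pvFindEndA 0 (l.drop s).length (l.drop s)
  | 0, l, _ => by simp
  | s + 1, [], h => by simp [pvFindEndA] at h
  | s + 1, ts :: rest, h => by
      rw [pvFindEndA, List.length_cons, pvFindEndA_shift rest 0 rest.length] at h ⊢
      by_cases hd : pvAnyDone (pvAgents ts) = true
      · rw [if_pos hd] at h; omega
      · rw [if_neg hd] at h ⊢
        rw [List.drop_succ_cons]
        have := pvFindEndA_drop s rest (by omega)
        omega

-- characterisation of B's first loop by A's two indices
theorem pvFindFirstB_eq : ∀ (l : List (List (String × List (List (String × Option String))))),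
    pvFindFirstB l =
      match pvFindStartA 0 l with
      | none => none
      | some s =>
        if s < pvFindEndA 0 l.length l then
          match l.drop s with
          | [] => none
          | f :: it => some (f, it)
        else none
  | [] => rfl
  | ts :: rest => by
      rw [pvFindFirstB, pvFindStartA, pvFindEndA]
      by_cases hd : pvAnyDone (pvAgents ts) = true
      · simp only [hd, if_true]
        split
        · simp
        · simp
      · simp only [hd, Bool.false_eq_true, if_false]
        by_cases hp : pvAllPresent (pvAgents ts) = true
        · simp only [hp, if_true, List.length_cons,
            pvFindEndA_shift rest 0 rest.length]
          simp
        · simp only [hp, Bool.false_eq_true, if_false]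
          rw [pvFindFirstB_eq rest, pvFindStartA_shift rest 0, List.length_cons,
            pvFindEndA_shift rest 0 rest.length]
          cases pvFindStartA 0 rest with
          | none => rfl
          | some s =>
            simp only [Option.map_some, List.drop_succ_cons]
            by_cases hlt : s < pvFindEndA 0 rest.length rest
            · rw [if_pos hlt, if_pos (by omega)]
            · rw [if_neg hlt, if_neg (by omega)]

-- ===== VERDICT (by name: the statement is the Claim_ definition above) =====
theorem trim_to_common_presence_py_spec : Claim_equal_trim_to_common_presence_py := by
  intro timesteps _ _
  unfold Spec_trim_to_common_presence_py trim_to_common_presence_py trim_to_common_presence_py_alt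
  by_cases he : timesteps.isEmpty
  · simp [he]
  · simp only [he, Bool.false_eq_true, if_false]
    rw [pvFindFirstB_eq timesteps]
    cases hst : pvFindStartA 0 timesteps with
    | none => rfl
    | some s =>
      by_cases hlt : s < pvFindEndA 0 timesteps.length timesteps
      · simp only [hlt, if_true]
        set e := pvFindEndA 0 timesteps.length timesteps with he'
        rw [PySem.List.slice_natCast]
        cases hdrop : timesteps.drop s with
        | nil =>
          exfalso
          have hlen : timesteps.length ≤ s := by
            have := congrArg List.length hdrop
            simp [List.length_drop] at this
            omega
          have hle : e ≤ timesteps.length := pvFindEndA_le timesteps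
          omega
        | cons f it =>
          have hdd : timesteps.drop (s + 1) = it := by
            have h1 := congrArg List.tail hdrop
            simpa [List.tail_drop] using h1
          have hE := pvFindEndA_drop (s + 1) timesteps (by omega)
          rw [hdd] at hE
          show List.take (e - s) (f :: it) = f :: pvTakeWB it
          rw [show e - s = pvFindEndA 0 it.length it + 1 from by omega,
            List.take_succ_cons, pvTakeWB_eq it]
      · simp [hlt]
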